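-- pv_equiv track=rewrite | github.com/SamiaAitAyadGoncalves/codewars-1 | Python/5kyu/Double Cola.py | who_is_next
-- ===== SOURCE A (Python) =====
-- import math
--
-- def who_is_next(names, r):
--     l = len(names)
--
--     count = 0
--     factor = 1
--     while count < r:
--         change = l*factor
--         count += change
--         factor *= 2
--
--     i = math.ceil((change-(count-r))/(factor//2))
--     return names[i-1]
-- ===== SOURCE B (Python) =====
-- def who_is_next(names, r):
--     while r > len(names):
--         r = (r - len(names) + 1) // 2
--     return names[r - 1]
-- ===== Notes on version B (the rewrite author's own statement) =====
-- stated objective: simpler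
-- what changed: B shrinks the target position r backwards through the doubling rounds (r -> (r - len + 1)//2 until r <= len) instead of A's forward accumulation of a count with a doubling factor followed by a ceiling back-calculation.
import Mathlib
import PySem

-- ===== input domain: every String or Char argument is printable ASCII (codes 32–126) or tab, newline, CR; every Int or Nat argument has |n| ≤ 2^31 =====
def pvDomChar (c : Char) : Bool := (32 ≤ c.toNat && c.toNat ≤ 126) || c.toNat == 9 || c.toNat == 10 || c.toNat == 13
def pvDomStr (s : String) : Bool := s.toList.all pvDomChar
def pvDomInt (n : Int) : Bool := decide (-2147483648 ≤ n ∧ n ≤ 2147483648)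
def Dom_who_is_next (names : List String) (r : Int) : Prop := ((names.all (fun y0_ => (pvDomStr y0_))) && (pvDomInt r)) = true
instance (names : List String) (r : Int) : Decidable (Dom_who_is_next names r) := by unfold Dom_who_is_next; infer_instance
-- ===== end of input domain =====

-- B finds the r-th name by shrinking the position backwards through the doubling rounds
-- (r -> (r - len + 1)//2 until r <= len) instead of A's forward count/factor accumulation
-- with a ceiling back-calculation; same logarithmic cost, simpler code.


-- ===== PORT A =====
-- A's while-loop: starts with count = 0, factor = 1; under Pre_ (1 ≤ r) the body runs at
-- least once, so it is ported as a do-while returning (change, count, factor).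
-- The '0 < l * factor' conjunct is a totality guard only: when l * factor ≤ 0 the Python
-- loop never terminates (count never reaches r), which Pre_ excludes (names ≠ []).
def whoLoopA (l r count factor : Int) : Int × Int × Int :=
  -- change := l * factor; count' := count + change; factor' := factor * 2, inlined
  if h : count + l * factor < r ∧ 0 < l * factor then
    whoLoopA l r (count + l * factor) (factor * 2)
  else (l * factor, count + l * factor, factor * 2)
termination_by (r - count).toNat
decreasing_by
  obtain ⟨h1, h2⟩ := h
  generalize l * factor = k at h1 h2 ⊢
  omega

def who_is_next (names : List String) (r : Int) : String :=
  let l : Int := names.length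
  let t := whoLoopA l r 0 1
  -- math.ceil((change - (count - r)) / (factor // 2)): the operands are ints, so the
  -- ceiling of the exact quotient is ported as the exact integer ceiling -((-a) // b)
  -- (exact on Dom's |int| ≤ 2^31, where the float quotient is exact or rounds safely).
  let i := -(PySem.Int.floordiv (-(t.1 - (t.2.1 - r))) (PySem.Int.floordiv t.2.2 2))
  -- names[i-1]; none = IndexError, excluded by Pre_
  (PySem.List.pyGet? names (i - 1)).getD ""

-- ===== PORT B =====
-- B's while-loop: shrink r until it is ≤ len(names).
-- The '0 < l' conjunct is a totality guard only: for l = 0 the Python loop diverges.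
def whoLoopB (l r : Int) : Int :=
  if h : 0 < l ∧ l < r then whoLoopB l (PySem.Int.floordiv (r - l + 1) 2) else r
termination_by r.toNat
decreasing_by
  obtain ⟨h1, h2⟩ := h
  rw [PySem.Int.floordiv_eq_ediv_of_pos (by omega)]
  omega

def who_is_next_alt (names : List String) (r : Int) : String :=
  -- names[r-1]; none = IndexError, excluded by Pre_
  (PySem.List.pyGet? names (whoLoopB (names.length) r - 1)).getD ""

-- ===== PRECONDITION & SPEC =====
-- Pre_ excludes exactly the inputs where A does not return: for r ≤ 0 A raises
-- UnboundLocalError ('change' never assigned), and for names = [] A's loop diverges.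
def Pre_who_is_next (names : List String) (r : Int) : Prop := names ≠ [] ∧ 1 ≤ r
instance (names : List String) (r : Int) : Decidable (Pre_who_is_next names r) := by unfold Pre_who_is_next; infer_instance

def pvWitness_who_is_next : List String × Int := (["Sheldon", "Leonard", "Penny"], 7)

def Spec_who_is_next (names : List String) (r : Int) (out : String) : Prop := out = who_is_next_alt names r
instance (names : List String) (r : Int) (out : String) : Decidable (Spec_who_is_next names r out) := by unfold Spec_who_is_next; infer_instance

-- ===== CLAIM (what is proved, stated in full; the proofs are below) =====
def Claim_equal_who_is_next : Prop := ∀ (names : List String) (r : Int), Dom_who_is_next names r → Pre_who_is_next names r → Spec_who_is_next names r (who_is_next names r)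

-- ===== LEMMAS AND PROOFS =====

-- ceiling division by a positive b, as in port A
def cdiv (a b : Int) : Int := -(PySem.Int.floordiv (-a) b)

theorem cdiv_char {a b q : Int} (hb : 0 < b) : cdiv a b = q ↔ (q - 1) * b < a ∧ a ≤ q * b := by
  unfold cdiv
  exact PySem.Int.neg_floordiv_neg_eq_iff_of_pos hb

theorem cdiv_bounds (a : Int) {b : Int} (hb : 0 < b) : (cdiv a b - 1) * b < a ∧ a ≤ cdiv a b * b :=
  (cdiv_char hb).mp rfl

theorem cdiv_one (a : Int) : cdiv a 1 = a := by
  rw [cdiv_char (by norm_num)]; omega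

-- (r - l + 1) // 2 = ceil((r - l)/2)
theorem floordiv_succ_two_eq_cdiv (a : Int) : PySem.Int.floordiv (a + 1) 2 = cdiv a 2 := by
  have h := cdiv_bounds a (b := 2) (by norm_num)
  rw [PySem.Int.floordiv_eq_iff_of_pos (b := 2) (by norm_num)]
  omega

-- shift an integer multiple out of a ceiling division
theorem cdiv_sub_mul {x c b : Int} (hb : 0 < b) : cdiv (x - c * b) b = cdiv x b - c := by
  have h := cdiv_bounds x hb
  rw [cdiv_char hb]
  constructor <;> nlinarith

-- nested ceilings: ceil(ceil(x/b)/2) = ceil(x/(2b))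
theorem cdiv_cdiv {x b : Int} (hb : 0 < b) : cdiv (cdiv x b) 2 = cdiv x (b * 2) := by
  have h1 := cdiv_bounds x hb
  have h3 := cdiv_bounds x (b := b * 2) (by positivity)
  rw [cdiv_char (by norm_num)]
  constructor <;> nlinarith

-- the A-loop's back-calculated index equals B's shrinking loop applied to ceil((r-count)/factor)
theorem loop_key : ∀ (n : Nat) (l r count factor : Int), (r - count).toNat = n →
    0 < l → 0 < factor → count < r →
    cdiv ((whoLoopA l r count factor).1 - ((whoLoopA l r count factor).2.1 - r))
         (PySem.Int.floordiv (whoLoopA l r count factor).2.2 2)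
      = whoLoopB l (cdiv (r - count) factor) := by
  intro n
  induction n using Nat.strong_induction_on with
  | _ n ih =>
    intro l r count factor hn hl hf hcr
    have hlf : 0 < l * factor := mul_pos hl hf
    have hfact2 : PySem.Int.floordiv (factor * 2) 2 = factor := by
      rw [PySem.Int.floordiv_eq_iff_of_pos (by norm_num)]; omega
    have hs := cdiv_bounds (r - count) hf
    rw [whoLoopA.eq_def]
    by_cases hc : count + l * factor < r ∧ 0 < l * factor
    · rw [dif_pos hc]
      -- B's loop takes a step: l < ceil((r-count)/factor)
      have hlt : l < cdiv (r - count) factor := by nlinarith [hs.2, hc.1]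
      rw [whoLoopB.eq_def, dif_pos ⟨hl, hlt⟩]
      have hstep : PySem.Int.floordiv (cdiv (r - count) factor - l + 1) 2
          = cdiv (r - (count + l * factor)) (factor * 2) := by
        rw [floordiv_succ_two_eq_cdiv]
        have : cdiv (r - count) factor - l = cdiv ((r - count) - l * factor) factor := by
          rw [cdiv_sub_mul hf]
        rw [this, cdiv_cdiv hf]
        ring_nf
      rw [hstep]
      exact ih (r - (count + l * factor)).toNat (by omega) l r _ _ rfl hl (by omega) (by omega)
    · rw [dif_neg hc]
      have hstop : ¬ count + l * factor < r := by tauto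
      simp only []
      rw [hfact2]
      have hi : l * factor - (count + l * factor - r) = r - count := by ring
      rw [hi]
      -- B's loop stops: ceil((r-count)/factor) ≤ l
      have hle : ¬ l < cdiv (r - count) factor := by
        intro h
        nlinarith [hs.1]
      rw [whoLoopB.eq_def, dif_neg (by tauto)]

-- ===== VERDICT (by name: the statement is the Claim_ definition above) =====
theorem who_is_next_spec : Claim_equal_who_is_next := by
  intro names r _ hpre
  obtain ⟨hne, hr⟩ := hpre
  have hl : 0 < (names.length : Int) := by
    have : names.length ≠ 0 := by simpa using hne
    omega
  have h := loop_key (r - 0).toNat (names.length) r 0 1 rfl hl (by norm_num) (by omega)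
  simp only [sub_zero] at h
  rw [cdiv_one] at h
  unfold Spec_who_is_next who_is_next who_is_next_alt
  show (PySem.List.pyGet? names
      (cdiv ((whoLoopA (names.length : Int) r 0 1).1 - ((whoLoopA (names.length : Int) r 0 1).2.1 - r))
            (PySem.Int.floordiv (whoLoopA (names.length : Int) r 0 1).2.2 2) - 1)).getD ""
    = (PySem.List.pyGet? names (whoLoopB (names.length : Int) r - 1)).getD ""
  rw [h]
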